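-- pv_equiv track=rewrite | github.com/sigord/MADE_Algorithms_and_data_structures | Main course/HW7 Segment requests/B.py | get_array_of_k
-- ===== SOURCE A (Python) =====
-- def get_k_power_of_two(k):
--     return 1 << k
--
-- def get_array_of_k(n):
--     k = [None] * (n + 1)
--     k[1] = 0
--     for i in range(2, n + 1):
--         k[i] = k[i - 1]
--         if get_k_power_of_two(k[i] + 1) <= i:
--             k[i] += 1
--     return k
-- ===== SOURCE B (Python) =====
-- def get_array_of_k(n):
--     return [None] + [i.bit_length() - 1 for i in range(1, n + 1)]
-- ===== Notes on version B (the rewrite author's own statement) =====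
-- stated objective: idiomatic
-- what changed: Replaces the sequential recurrence k[i]=k[i-1](+1 when 2^(k+1)<=i) by a direct per-element closed form i.bit_length()-1 built with a comprehension, so no loop-carried state remains.
import Mathlib
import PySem

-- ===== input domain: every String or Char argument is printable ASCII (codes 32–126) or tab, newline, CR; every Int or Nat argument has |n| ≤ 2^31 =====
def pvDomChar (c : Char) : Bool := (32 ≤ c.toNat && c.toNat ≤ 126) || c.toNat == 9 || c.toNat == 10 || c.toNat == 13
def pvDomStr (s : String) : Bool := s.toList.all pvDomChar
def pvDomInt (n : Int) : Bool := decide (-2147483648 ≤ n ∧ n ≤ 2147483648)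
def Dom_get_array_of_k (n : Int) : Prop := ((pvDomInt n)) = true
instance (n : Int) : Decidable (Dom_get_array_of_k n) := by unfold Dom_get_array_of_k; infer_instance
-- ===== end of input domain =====

-- B replaces A's loop-carried recurrence by a per-element closed form (bit_length - 1); same O(n) cost, different strategy.
-- Pre_ excludes n < 1, where the Python A raises IndexError at `k[1] = 0`.


-- ===== PORT A =====
-- 1 << k; the shift amount is k[i-1]+1 ≥ 1 on every admitted input, so .toNat is exact
def get_k_power_of_two (k : Int) : Int := 1 <<< k.toNat

def get_array_of_k (n : Int) : List (Option Int) :=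
  let k0 : List (Option Int) := (List.replicate (n + 1).toNat none).set 1 (some 0)
  (PySem.List.pyRange 2 (n + 1) 1).foldl
    (fun k i =>
      match k.getD (i - 1).toNat none with   -- k[i] = k[i - 1]
      | some x =>
          let k := k.set i.toNat (some x)
          if get_k_power_of_two (x + 1) ≤ i then k.set i.toNat (some (x + 1)) else k
      | none => k.set i.toNat none) k0

-- ===== PORT B =====
-- int.bit_length: 0 for 0, otherwise floor(log2 |i|) + 1
def pyBitLength (i : Int) : Int := if i = 0 then 0 else (Nat.log2 i.natAbs : Int) + 1

def get_array_of_k_alt (n : Int) : List (Option Int) :=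
  none :: (PySem.List.pyRange 1 (n + 1) 1).map (fun i => some (pyBitLength i - 1))

-- ===== PRECONDITION & SPEC =====
-- For n < 1 Python A raises IndexError at `k[1] = 0`.
def Pre_get_array_of_k (n : Int) : Prop := 1 ≤ n
instance (n : Int) : Decidable (Pre_get_array_of_k n) := by unfold Pre_get_array_of_k; infer_instance
def pvWitness_get_array_of_k : Int := 3

def Spec_get_array_of_k (n : Int) (out : List (Option Int)) : Prop := out = get_array_of_k_alt n
instance (n : Int) (out : List (Option Int)) : Decidable (Spec_get_array_of_k n out) := by unfold Spec_get_array_of_k; infer_instance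

-- ===== CLAIM (what is proved, stated in full; the proofs are below) =====
def Claim_equal_get_array_of_k : Prop := ∀ (n : Int), Dom_get_array_of_k n → Pre_get_array_of_k n → Spec_get_array_of_k n (get_array_of_k n)

-- ===== LEMMAS AND PROOFS =====

-- the value A stores at position j (j ≥ 1): floor(log2 j)
def pvPrefix (j : Nat) : List (Option Int) :=
  none :: (List.range j).map (fun k => some ((Nat.log2 (k + 1) : Int)))

theorem pvPrefix_length (j : Nat) : (pvPrefix j).length = j + 1 := by
  simp [pvPrefix]

theorem pvPrefix_succ (j : Nat) :
    pvPrefix (j + 1) = pvPrefix j ++ [some ((Nat.log2 (j + 1) : Int))] := by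
  simp [pvPrefix, List.range_succ]

theorem pvPrefix_getD (j : Nat) (hj : 1 ≤ j) (rest : List (Option Int)) :
    (pvPrefix j ++ rest).getD j none = some ((Nat.log2 j : Int)) := by
  obtain ⟨j', rfl⟩ : ∃ j', j = j' + 1 := ⟨j - 1, by omega⟩
  simp [pvPrefix]

-- log2 recurrence that A's loop implements
theorem pvLog2_succ (j : Nat) (hj : 1 ≤ j) :
    Nat.log2 (j + 1) = if 2 ^ (Nat.log2 j + 1) ≤ j + 1 then Nat.log2 j + 1 else Nat.log2 j := by
  have hj0 : j ≠ 0 := by omega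
  have h1 : 2 ^ Nat.log2 j ≤ j := Nat.log2_self_le hj0
  have h2 : j < 2 ^ (Nat.log2 j + 1) := Nat.lt_log2_self
  split_ifs with h
  · have heq : j + 1 = 2 ^ (Nat.log2 j + 1) := by omega
    rw [heq, Nat.log2_two_pow]
  · have := Nat.log_eq_of_pow_le_of_lt_pow (b := 2) (m := Nat.log2 j) (n := j + 1)
      (by omega) (by omega)
    rw [Nat.log2_eq_log_two]; exact this

theorem pvShift (t : Nat) : get_k_power_of_two ((t : Int)) = ((2 ^ t : Nat) : Int) := by
  simp [get_k_power_of_two, Int.shiftLeft_eq]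

-- one step of A's loop, applied at i = j + 1 to the invariant state
theorem pvStep (m j : Nat) (hj : 1 ≤ j) (hjm : j + 1 ≤ m) :
    (fun (k : List (Option Int)) (i : Int) =>
      match k.getD (i - 1).toNat none with
      | some x =>
          let k := k.set i.toNat (some x)
          if get_k_power_of_two (x + 1) ≤ i then k.set i.toNat (some (x + 1)) else k
      | none => k.set i.toNat none)
      (pvPrefix j ++ List.replicate (m - j) none) ((j : Int) + 1)
    = pvPrefix (j + 1) ++ List.replicate (m - (j + 1)) none := by
  have hget : ((pvPrefix j ++ List.replicate (m - j) none).getD ((j : Int) + 1 - 1).toNat none)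
      = some ((Nat.log2 j : Int)) := by
    have : ((j : Int) + 1 - 1).toNat = j := by omega
    rw [this]; exact pvPrefix_getD j hj _
  beta_reduce
  rw [hget]
  have htn : ((j : Int) + 1).toNat = j + 1 := by omega
  obtain ⟨r, hr⟩ : ∃ r, m - j = r + 1 := ⟨m - j - 1, by omega⟩
  have hset : ∀ v : Option Int,
      (pvPrefix j ++ List.replicate (m - j) none).set (j + 1) v
      = pvPrefix j ++ (v :: List.replicate (m - (j + 1)) none) := by
    intro v
    rw [List.set_append_right _ _ (by simp [pvPrefix_length]), hr]
    have : j + 1 - (pvPrefix j).length = 0 := by simp [pvPrefix_length]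
    rw [this]
    have hr2 : m - (j + 1) = r := by omega
    simp [hr2, List.replicate_succ]
  have hcast : ((Nat.log2 j : Int) + 1).toNat = Nat.log2 j + 1 := by omega
  have hcond : (get_k_power_of_two ((Nat.log2 j : Int) + 1) ≤ (j : Int) + 1)
      ↔ (2 ^ (Nat.log2 j + 1) ≤ j + 1) := by
    have : ((Nat.log2 j : Int) + 1) = ((Nat.log2 j + 1 : Nat) : Int) := by push_cast; ring
    rw [this, pvShift]
    constructor <;> intro h <;> [exact_mod_cast h; exact_mod_cast h]
  simp only [htn]
  rw [pvPrefix_succ, pvLog2_succ j hj]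
  by_cases h : 2 ^ (Nat.log2 j + 1) ≤ j + 1
  · rw [if_pos (hcond.mpr h), List.set_set, hset, if_pos h]
    push_cast
    simp
  · rw [if_neg (fun hc => h (hcond.mp hc)), hset, if_neg h]
    simp

-- the loop invariant: after processing i = 2 .. j, the list is pvPrefix j ++ untouched tail
theorem pvLoopInv (m : Nat) : ∀ j : Nat, 1 ≤ j → j ≤ m →
    (PySem.List.pyRange 2 ((j : Int) + 1) 1).foldl
      (fun k i =>
        match k.getD (i - 1).toNat none with
        | some x =>
            let k := k.set i.toNat (some x)
            if get_k_power_of_two (x + 1) ≤ i then k.set i.toNat (some (x + 1)) else k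
        | none => k.set i.toNat none)
      (pvPrefix 1 ++ List.replicate (m - 1) none)
    = pvPrefix j ++ List.replicate (m - j) none := by
  intro j hj
  induction j, hj using Nat.le_induction with
  | base =>
    intro _
    rw [PySem.List.pyRange_one_eq_nil (by norm_num)]
    simp
  | succ j hj ih =>
    intro hjm
    have hsplit : PySem.List.pyRange 2 ((↑(j + 1) : Int) + 1) 1
        = PySem.List.pyRange 2 ((j : Int) + 1) 1 ++ [(j : Int) + 1] := by
      have : ((↑(j + 1) : Int) + 1) = ((j : Int) + 1) + 1 := by push_cast; ring
      rw [this, PySem.List.pyRange_one_succ_right (by omega)]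
    rw [hsplit, List.foldl_append, ih (by omega), List.foldl_cons, List.foldl_nil]
    exact pvStep m j hj hjm

theorem pvBase (m : Nat) (hm : 1 ≤ m) :
    (List.replicate (((m : Int) + 1).toNat) (none : Option Int)).set 1 (some 0)
    = pvPrefix 1 ++ List.replicate (m - 1) none := by
  have h1 : ((m : Int) + 1).toNat = m + 1 := by omega
  obtain ⟨r, hr⟩ : ∃ r, m = r + 1 := ⟨m - 1, by omega⟩
  subst hr
  have h2 : ((r : Int) + 1 + 1).toNat = r + 2 := by omega
  rw [h1]
  simp [pvPrefix, List.replicate_succ, List.set_cons_succ, List.set_cons_zero]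

theorem pvAlt (m : Nat) : get_array_of_k_alt ((m : Int)) = pvPrefix m := by
  unfold get_array_of_k_alt pvPrefix
  congr 1
  rw [PySem.List.pyRange_one]
  have h1 : (((m : Int) + 1) - 1).toNat = m := by omega
  rw [h1, List.map_map]
  apply List.map_congr_left
  intro k hk
  simp only [Function.comp]
  have hne : (1 : Int) + (k : Int) ≠ 0 := by omega
  have habs : ((1 : Int) + (k : Int)).natAbs = k + 1 := by omega
  simp [pyBitLength, hne, habs]

theorem get_array_of_k_spec : Claim_equal_get_array_of_k := by
  intro n _ hpre
  unfold Pre_get_array_of_k at hpre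
  unfold Spec_get_array_of_k
  obtain ⟨m, rfl⟩ : ∃ m : Nat, n = (m : Int) := ⟨n.toNat, by omega⟩
  have hm : 1 ≤ m := by exact_mod_cast hpre
  unfold get_array_of_k
  rw [pvBase m hm, pvLoopInv m m hm (le_refl m), pvAlt m]
  simp
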